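-- pv_equiv track=rewrite | github.com/sarpyvz/Mastermind | mastermind.py | calculate_negscore
-- ===== SOURCE A (Python) =====
-- def calculate_negscore(candidate, guess):
--     y = 0
--     candidate = str(candidate)
--     guess = str(guess)
--     for i in range(0, len(guess)):
--         for x in range(0, len(guess)):
--             if candidate[i] == guess[x]:
--                 y -= 1
--     return y
-- ===== SOURCE B (Python) =====
-- def calculate_negscore(candidate, guess):
--     candidate = str(candidate)
--     guess = str(guess)
--     prefix = candidate[:len(guess)]
--     gcount = {}
--     for ch in guess:
--         gcount[ch] = gcount.get(ch, 0) + 1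
--     return -sum(gcount.get(ch, 0) for ch in prefix)
-- ===== Notes on version B (the rewrite author's own statement) =====
-- stated objective: faster
-- what changed: Replaces the O(n^2) nested scan (for each candidate position, scan all of guess) with a frequency dictionary of guess built once, then one pass over the candidate prefix summing the counts.
import Mathlib
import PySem

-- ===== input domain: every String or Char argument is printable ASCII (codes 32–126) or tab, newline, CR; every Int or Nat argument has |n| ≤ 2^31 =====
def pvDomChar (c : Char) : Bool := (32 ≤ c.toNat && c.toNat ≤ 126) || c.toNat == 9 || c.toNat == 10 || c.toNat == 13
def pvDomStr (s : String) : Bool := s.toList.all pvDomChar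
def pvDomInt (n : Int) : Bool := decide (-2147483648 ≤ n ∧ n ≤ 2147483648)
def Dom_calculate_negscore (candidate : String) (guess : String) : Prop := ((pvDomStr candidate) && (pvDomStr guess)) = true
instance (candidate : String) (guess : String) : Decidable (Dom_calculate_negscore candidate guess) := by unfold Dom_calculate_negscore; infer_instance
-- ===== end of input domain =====

-- B replaces A's nested quadratic scan with a frequency dictionary of guess built once
-- plus one pass over the candidate prefix (asymptotically faster); same return value.

-- ===== PORT A =====
def calculate_negscore (candidate : String) (guess : String) : Int :=
  let c := candidate.toList;
  let g := guess.toList;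
  (PySem.List.pyRange 0 (g.length : Int) 1).foldl (fun y i =>
    (PySem.List.pyRange 0 (g.length : Int) 1).foldl (fun y x =>
      match PySem.List.pyGet? c i, PySem.List.pyGet? g x with
      | some a, some b => if a = b then y - 1 else y
      | _, _ => y) y) 0

-- ===== PORT B =====
def calculate_negscore_alt (candidate : String) (guess : String) : Int :=
  let g := guess.toList;
  let pfx := PySem.List.slice candidate.toList none (some (g.length : Int));
  let gcount : PySem.Dict Char Int := g.foldl (fun d ch => d.insert ch (d.getD ch 0 + 1)) PySem.Dict.empty;
  -(pfx.foldl (fun s ch => s + gcount.getD ch 0) 0)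

-- ===== PRECONDITION & SPEC =====
-- A indexes candidate[i] for every i < len(guess): it raises IndexError whenever guess is longer than candidate.
def Pre_calculate_negscore (candidate : String) (guess : String) : Prop :=
  guess.toList.length ≤ candidate.toList.length
instance (candidate : String) (guess : String) : Decidable (Pre_calculate_negscore candidate guess) := by unfold Pre_calculate_negscore; infer_instance
def pvWitness_calculate_negscore : String × String := ("abca", "cab")

def Spec_calculate_negscore (candidate : String) (guess : String) (out : Int) : Prop := out = calculate_negscore_alt candidate guess
instance (candidate : String) (guess : String) (out : Int) : Decidable (Spec_calculate_negscore candidate guess out) := by unfold Spec_calculate_negscore; infer_instance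

-- ===== CLAIM (what is proved, stated in full; the proofs are below) =====
def Claim_equal_calculate_negscore : Prop := ∀ (candidate : String) (guess : String), Dom_calculate_negscore candidate guess → Pre_calculate_negscore candidate guess → Spec_calculate_negscore candidate guess (calculate_negscore candidate guess)

-- ===== LEMMAS AND PROOFS =====

-- pointwise negation under sum
theorem sum_map_negf (pfx : List Char) (f : Char → Int) :
    (List.map (fun x => -f x) pfx).sum = -(List.map f pfx).sum := by
  induction pfx with
  | nil => simp
  | cons h t ih => simp [ih]; ring

-- B's insert-based counting loop computes occurrence counts.
theorem gcount_getD (l : List Char) (d : PySem.Dict Char Int) (v : Char) :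
    (l.foldl (fun d ch => d.insert ch (d.getD ch 0 + 1)) d).getD v 0
      = d.getD v 0 + l.count v := by
  induction l generalizing d with
  | nil => simp
  | cons h t ih =>
      rw [List.foldl_cons, ih, PySem.Dict.getD_insert, List.count_cons]
      by_cases hv : v = h
      · simp [hv]; ring
      · simp [hv, Ne.symm hv]

-- the counting fold, on a plain list
theorem foldl_sub_count (g : List Char) (a : Char) (y : Int) :
    g.foldl (fun y b => if a = b then y - 1 else y) y = y - g.count a := by
  induction g generalizing y with
  | nil => simp
  | cons h t ih =>
      rw [List.foldl_cons, List.count_cons]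
      by_cases hv : a = h
      · rw [if_pos hv, ih]; simp [hv]; ring
      · rw [if_neg hv, ih]; simp [Ne.symm hv]

-- A's inner loop over guess, when candidate[i] = a is in range, subtracts the count of a in guess.
theorem inner_loop_eq (g : List Char) (a : Char) (y : Int) :
    (PySem.List.pyRange 0 (g.length : Int) 1).foldl (fun y x =>
      match (some a : Option Char), PySem.List.pyGet? g x with
      | some a, some b => if a = b then y - 1 else y
      | _, _ => y) y = y - g.count a := by
  have hc := PySem.List.foldl_congr_mem (PySem.List.pyRange 0 (g.length : Int) 1)
    (fun y x =>
      match (some a : Option Char), PySem.List.pyGet? g x with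
      | some a, some b => if a = b then y - 1 else y
      | _, _ => y)
    (fun y x => if a = PySem.List.pyGetD g x ' ' then y - 1 else y) y
    (by
      intro acc x hx
      rw [PySem.List.mem_pyRange_one] at hx
      beta_reduce
      rw [PySem.List.pyGet?_eq_some_getElem g hx.1 hx.2,
          PySem.List.pyGetD_eq_getElem g ' ' hx.1 hx.2])
  rw [hc, PySem.List.foldl_pyRange_zero_pyGetD' g ' '
        (fun y b => if a = b then y - 1 else y) y, foldl_sub_count]

-- ===== VERDICT (by name: the statement is the Claim_ definition above) =====
theorem calculate_negscore_spec : Claim_equal_calculate_negscore := by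
  intro candidate guess _ hpre
  unfold Spec_calculate_negscore calculate_negscore calculate_negscore_alt
  unfold Pre_calculate_negscore at hpre
  set c := candidate.toList with hc
  set g := guess.toList with hg
  set pfx := PySem.List.slice c none (some (g.length : Int)) with hpfx
  have hpfx_take : pfx = c.take g.length := by
    rw [hpfx, PySem.List.slice_to_natCast]
  have hlenp : pfx.length = g.length := by
    rw [hpfx_take, List.length_take]; omega
  -- A's side: fold over the prefix of counts
  have hA : (PySem.List.pyRange 0 (g.length : Int) 1).foldl (fun y i =>
      (PySem.List.pyRange 0 (g.length : Int) 1).foldl (fun y x =>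
        match PySem.List.pyGet? c i, PySem.List.pyGet? g x with
        | some a, some b => if a = b then y - 1 else y
        | _, _ => y) y) 0
      = pfx.foldl (fun y a => y + -(g.count a : Int)) 0 := by
    have h1 := PySem.List.foldl_congr_mem (PySem.List.pyRange 0 (g.length : Int) 1)
      (fun y i =>
        (PySem.List.pyRange 0 (g.length : Int) 1).foldl (fun y x =>
          match PySem.List.pyGet? c i, PySem.List.pyGet? g x with
          | some a, some b => if a = b then y - 1 else y
          | _, _ => y) y)
      (fun y i => y + -(g.count (PySem.List.pyGetD pfx i ' ') : Int)) 0
      (by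
        intro acc i hi
        rw [PySem.List.mem_pyRange_one] at hi
        have hic : (i < (c.length : Int)) := by
          have := hi.2; omega
        have hip : (i < (pfx.length : Int)) := by
          have := hi.2; rw [hlenp]; omega
        beta_reduce
        rw [PySem.List.pyGet?_eq_some_getElem c hi.1 hic]
        rw [inner_loop_eq]
        rw [PySem.List.pyGetD_eq_getElem pfx ' ' hi.1 hip]
        simp only [hpfx_take, List.getElem_take]
        ring)
    rw [h1, ← hlenp,
        PySem.List.foldl_pyRange_zero_pyGetD' pfx ' '
          (fun y a => y + -(g.count a : Int)) 0]
  rw [hA]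
  -- B's side: the dict lookups are counts
  have hB := PySem.List.foldl_congr_mem pfx
      (fun s ch =>
        s + (g.foldl (fun d ch => d.insert ch (d.getD ch 0 + 1))
              (PySem.Dict.empty : PySem.Dict Char Int)).getD ch 0)
      (fun s ch => s + (g.count ch : Int)) 0
      (by intro acc ch _; beta_reduce; rw [gcount_getD]; simp)
  have hcount : ∀ x : Char,
      (g.foldl (fun d ch => d.insert ch (d.getD ch 0 + 1))
        (PySem.Dict.empty : PySem.Dict Char Int)).getD x 0 = (g.count x : Int) := by
    intro x; rw [gcount_getD]; simp
  simp only [hcount, PySem.List.foldl_add]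
  simp only [zero_add]
  rw [← hpfx, sum_map_negf]
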